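-- pv_equiv track=rewrite | github.com/ravenclaw-b/adventofcode2024 | Day 21/d21.py | level1list
-- ===== SOURCE A (Python) =====
-- def findpathlist (a, b):
--     c = (b[0]-a[0], b[1]-a[1])
--     s1=""
--     s2=""
--
--
--     if c[0]>0:
--         s1 = "v"*abs(c[0])
--     elif c[0]<0:
--         s1 ="^"*abs(c[0])
--
--     if c[1]>0:
--         s2 = ">"*abs(c[1])
--     elif c[1]<0:
--         s2 ="<"*abs(c[1])
--
--
--     if c[0]==0:
--         return [s2+"A"]
--     elif c[1]==0:
--         return [s1+"A"]
--
--     if a[0]==3 and b[1]==0: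
--         return [s1+s2+"A"]
--     elif b[0]==3 and a[1]==0:
--         return [s2+s1+"A"]
--
--     else:
--         return [s1+s2+"A", s2+s1+"A"]
--
-- def level1list (solve):
--     keypad = {"7": (0, 0), "8": (0, 1), "9": (0, 2), "4": (1, 0), "5": (1, 1), "6": (1, 2), "1": (2, 0), "2": (2, 1), "3": (2, 2), "0": (3, 1), "A": (3, 2)}
--
--     ans = [""]
--
--     for i in range(0, len(solve)-1):
--         temp = findpathlist(keypad[solve[i]], keypad[solve[i+1]])
--         output = []
--         for x in ans:
--             for y in temp:
--                 output.append(x+y)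
--         ans = output.copy()
--     return ans
-- ===== SOURCE B (Python) =====
-- def level1list (solve):
--     # closed-form keypad coordinates instead of a dict, and a recursive back-to-front
--     # expansion over adjacent character pairs instead of an accumulator cross-product loop
--     def pos(ch):
--         if ch == "A":
--             return (3, 2)
--         d = int(ch)
--         if d == 0:
--             return (3, 1)
--         return ((9 - d) // 3, (d - 1) % 3)
--
--     def options(a, b):
--         dr = b[0] - a[0]
--         dc = b[1] - a[1]
--         v = ("v" if dr > 0 else "^") * abs(dr)
--         h = (">" if dc > 0 else "<") * abs(dc)
--         vh = v + h + "A"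
--         hv = h + v + "A"
--         if vh == hv:
--             return [vh]
--         if a[0] == 3 and b[1] == 0:
--             return [vh]
--         if b[0] == 3 and a[1] == 0:
--             return [hv]
--         return [vh, hv]
--
--     def go(chars):
--         if len(chars) < 2:
--             return [""]
--         opts = options(pos(chars[0]), pos(chars[1]))
--         rest = go(chars[1:])
--         return [o + s for o in opts for s in rest]
--
--     return go(list(solve))
-- ===== Notes on version B (the rewrite author's own statement) =====
-- stated objective: alternative
-- what changed: B replaces the keypad dict with closed-form coordinate arithmetic, computes each step's options as v/h run-length strings with a single vh==hv test instead of A's elif chain, and expands the result by back-to-front recursion over adjacent character pairs instead of A's accumulator cross-product loop.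
import Mathlib
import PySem

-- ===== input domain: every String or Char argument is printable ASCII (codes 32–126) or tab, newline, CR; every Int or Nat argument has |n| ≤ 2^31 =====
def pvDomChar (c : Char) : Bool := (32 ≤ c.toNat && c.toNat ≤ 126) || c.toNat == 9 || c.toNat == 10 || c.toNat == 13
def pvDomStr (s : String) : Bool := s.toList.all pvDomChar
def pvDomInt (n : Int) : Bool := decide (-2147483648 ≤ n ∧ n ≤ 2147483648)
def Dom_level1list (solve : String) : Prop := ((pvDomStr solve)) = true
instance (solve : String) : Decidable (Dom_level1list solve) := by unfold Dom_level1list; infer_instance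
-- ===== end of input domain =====

-- B replaces A's keypad dict by closed-form coordinate arithmetic, A's elif chain per
-- step by v/h run-length strings with one vh==hv test, and A's accumulator
-- cross-product loop by back-to-front recursion over adjacent pairs (objective:
-- alternative decomposition; same cost). Python str values are represented as
-- List Char internally (exact for indexing/concatenation) in both ports.

-- ===== PORT A =====
def findpathlistA (a b : Int × Int) : List (List Char) :=
  let c : Int × Int := (b.1 - a.1, b.2 - a.2)
  let s1 : List Char :=
    if c.1 > 0 then List.replicate c.1.natAbs 'v'
    else if c.1 < 0 then List.replicate c.1.natAbs '^'
    else []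
  let s2 : List Char :=
    if c.2 > 0 then List.replicate c.2.natAbs '>'
    else if c.2 < 0 then List.replicate c.2.natAbs '<'
    else []
  if c.1 = 0 then [s2 ++ ['A']]
  else if c.2 = 0 then [s1 ++ ['A']]
  else if a.1 = 3 ∧ b.2 = 0 then [s1 ++ s2 ++ ['A']]
  else if b.1 = 3 ∧ a.2 = 0 then [s2 ++ s1 ++ ['A']]
  else [s1 ++ s2 ++ ['A'], s2 ++ s1 ++ ['A']]

def keypadA : PySem.Dict Char (Int × Int) :=
  PySem.Dict.ofList [('7',(0,0)), ('8',(0,1)), ('9',(0,2)), ('4',(1,0)), ('5',(1,1)),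
                     ('6',(1,2)), ('1',(2,0)), ('2',(2,1)), ('3',(2,2)), ('0',(3,1)), ('A',(3,2))]

def level1list (solve : String) : List String :=
  -- keypad[solve[i]] raises KeyError on chars outside the keypad: excluded by Pre_ (the getD default is unreachable under Pre_)
  ((PySem.List.pyRange 0 ((solve.toList.length : Int) - 1) 1).foldl
    (fun ans i =>
      ans.foldl
        (fun output x =>
          (findpathlistA
            (PySem.Dict.getD keypadA (PySem.List.pyGetD solve.toList i 'A') (0, 0))
            (PySem.Dict.getD keypadA (PySem.List.pyGetD solve.toList (i + 1) 'A') (0, 0))).foldl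
            (fun output y => output ++ [x ++ y]) output)
        [])
    [([] : List Char)]).map String.ofList

-- ===== PORT B =====
-- int(ch) raises ValueError on non-digit chars: excluded by Pre_ (the getD default is unreachable under Pre_)
def posB (ch : Char) : Int × Int :=
  if ch = 'A' then (3, 2)
  else
    let d : Int := (PySem.Int.ofStr? (String.ofList [ch])).getD 0
    if d = 0 then (3, 1)
    else (PySem.Int.floordiv (9 - d) 3, PySem.Int.mod (d - 1) 3)

def optionsB (a b : Int × Int) : List (List Char) :=
  let dr := b.1 - a.1
  let dc := b.2 - a.2
  let v := List.replicate dr.natAbs (if dr > 0 then 'v' else '^')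
  let h := List.replicate dc.natAbs (if dc > 0 then '>' else '<')
  let vh := v ++ h ++ ['A']
  let hv := h ++ v ++ ['A']
  if vh = hv then [vh]
  else if a.1 = 3 ∧ b.2 = 0 then [vh]
  else if b.1 = 3 ∧ a.2 = 0 then [hv]
  else [vh, hv]

def goB : List Char → List (List Char)
  | a :: b :: rest =>
      (optionsB (posB a) (posB b)).flatMap
        (fun o => (goB (b :: rest)).map (fun s => o ++ s))
  | _ => [[]]

def level1list_alt (solve : String) : List String :=
  (goB solve.toList).map String.ofList

-- ===== PRECONDITION & SPEC =====
-- Pre_ excludes exactly the strings of length ≥ 2 containing a character that is not a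
-- keypad key, on which the Python A raises KeyError (shorter strings never reach the lookup).
def Pre_level1list (solve : String) : Prop :=
  solve.toList.length ≤ 1 ∨
    solve.toList.all (fun c => c ∈ ['7','8','9','4','5','6','1','2','3','0','A']) = true
instance (solve : String) : Decidable (Pre_level1list solve) := by unfold Pre_level1list; infer_instance
def pvWitness_level1list : String := "029A"

def Spec_level1list (solve : String) (out : List String) : Prop := out = level1list_alt solve
instance (solve : String) (out : List String) : Decidable (Spec_level1list solve out) := by unfold Spec_level1list; infer_instance

-- ===== CLAIM (what is proved, stated in full; the proofs are below) =====
def Claim_equal_level1list : Prop := ∀ (solve : String), Dom_level1list solve → Pre_level1list solve → Spec_level1list solve (level1list solve)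

-- ===== LEMMAS AND PROOFS =====

def keyChars : List Char := ['7','8','9','4','5','6','1','2','3','0','A']

-- generic "foldr of flatMap·map factors" (cartesian product, first factor slowest)
def prodJoin (ts : List (List (List Char))) : List (List Char) :=
  ts.foldr (fun t acc => t.flatMap (fun y => acc.map (y ++ ·))) [[]]

-- A's accumulator cross-product loop body equals a flatMap
lemma cross_eq_flatMap (ans : List (List Char)) (t : List (List Char)) :
    ans.foldl (fun output x => t.foldl (fun output y => output ++ [x ++ y]) output) [] =
      ans.flatMap (fun x => t.map (fun y => x ++ y)) := by
  simp only [PySem.List.foldl_append_singleton_eq_map]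
  simpa using PySem.List.foldl_append_eq_flatMap (fun x => t.map (fun y => x ++ y))
    (l := ans) (acc := [])

-- A's whole loop over an arbitrary index list, as the product of the per-index factors
lemma foldl_cross_eq (l : List Int) (f : Int → List (List Char)) (ans : List (List Char)) :
    l.foldl (fun ans i =>
        ans.foldl (fun output x => (f i).foldl (fun output y => output ++ [x ++ y]) output) []) ans =
      ans.flatMap (fun x => (prodJoin (l.map f)).map (fun z => x ++ z)) := by
  induction l generalizing ans with
  | nil => simp [prodJoin]
  | cons i l ih =>
    rw [List.foldl_cons, cross_eq_flatMap, ih]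
    simp [prodJoin, List.flatMap_assoc, List.map_flatMap, List.flatMap_map, Function.comp_def,
      List.append_assoc]

-- nat-index pair map over range equals zipWith with the tail
lemma range_pairs_eq_zipWith {α : Type} (F : Char → Char → α) (cs : List Char) :
    (List.range (cs.length - 1)).map (fun k => F (cs.getD k 'A') (cs.getD (k + 1) 'A')) =
      List.zipWith F cs cs.tail := by
  induction cs with
  | nil => simp
  | cons a cs ih =>
    match cs, ih with
    | [], _ => simp
    | b :: rest, ih =>
      have : (a :: b :: rest).length - 1 = ((b :: rest).length - 1) + 1 := by simp
      rw [this, List.range_succ_eq_map, List.map_cons, List.map_map]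
      simpa [Function.comp_def] using ih

-- the pyRange pair map is the zipWith with the tail
lemma pyRange_pairs_eq_zipWith {α : Type} (F : Char → Char → α) (cs : List Char) :
    (PySem.List.pyRange 0 ((cs.length : Int) - 1) 1).map
        (fun i => F (PySem.List.pyGetD cs i 'A') (PySem.List.pyGetD cs (i + 1) 'A')) =
      List.zipWith F cs cs.tail := by
  rw [PySem.List.pyRange_one, List.map_map]
  have hn : (((cs.length : Int) - 1) - 0).toNat = cs.length - 1 := by omega
  rw [hn, ← range_pairs_eq_zipWith F cs]
  apply List.map_congr_left
  intro k hk
  simp only [Function.comp_def, zero_add]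
  rw [show ((k : Int) + 1) = ((k + 1 : Nat) : Int) by push_cast; ring,
    PySem.List.pyGetD_natCast, PySem.List.pyGetD_natCast]

-- on keypad keys, A's dict lookup equals B's closed-form coordinates (11 cases)
lemma pos_eq : ∀ x ∈ keyChars, PySem.Dict.getD keypadA x (0,0) = posB x := by
  intro x hx; fin_cases hx <;> decide

lemma replicate_append_ne {x y : Char} (hxy : x ≠ y) {n m : Nat} (hn : 0 < n) (hm : 0 < m)
    (t u : List Char) : List.replicate n x ++ t ≠ List.replicate m y ++ u := by
  intro h
  cases n with
  | zero => omega
  | succ n =>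
    cases m with
    | zero => omega
    | succ m =>
      simp [List.replicate_succ] at h
      exact hxy h.1

-- A's per-step elif chain equals B's vh/hv formulation, for ALL integer coordinates
set_option maxHeartbeats 2000000 in
lemma findA_eq_optionsB (a b : Int × Int) : findpathlistA a b = optionsB a b := by
  rcases a with ⟨a1, a2⟩
  rcases b with ⟨b1, b2⟩
  simp only [findpathlistA, optionsB]
  simp only [List.append_assoc]
  rcases lt_trichotomy (b1 - a1) 0 with h1 | h1 | h1 <;>
    rcases lt_trichotomy (b2 - a2) 0 with h2 | h2 | h2 <;>
    split_ifs <;>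
    first
      | rfl
      | omega
      | (simp_all; done)
      | (rename_i heq; refine absurd heq (replicate_append_ne ?_ ?_ ?_ _ _) <;>
          first | decide | omega)

lemma zipWith_congr_mem {γ : Type} (f g : Char → Char → γ) :
    ∀ (l l' : List Char), (∀ a ∈ l, ∀ b ∈ l', f a b = g a b) →
      List.zipWith f l l' = List.zipWith g l l'
  | [], _, _ => by simp
  | _ :: _, [], _ => by simp
  | a :: l, b :: l', h => by
    simp only [List.zipWith_cons_cons]
    rw [h a (by simp) b (by simp),
      zipWith_congr_mem f g l l' (fun x hx y hy => h x (by simp [hx]) y (by simp [hy]))]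

-- B's recursion is the product of the per-pair factors
lemma goB_eq_prodJoin (cs : List Char) :
    goB cs = prodJoin (List.zipWith (fun x y => optionsB (posB x) (posB y)) cs cs.tail) := by
  induction cs with
  | nil => simp [goB, prodJoin]
  | cons a cs ih =>
    match cs, ih with
    | [], _ => simp [goB, prodJoin]
    | b :: rest, ih => simp [goB, prodJoin] at ih ⊢; rw [ih]

-- ===== VERDICT (by name: the statement is the Claim_ definition above) =====
theorem level1list_spec : Claim_equal_level1list := by
  intro solve _ hpre
  unfold Spec_level1list level1list level1list_alt
  rw [foldl_cross_eq _ _ [([] : List Char)]]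
  congr 1
  have hnil : ∀ X : List (List Char), [([] : List Char)].flatMap (fun x => X.map (fun z => x ++ z)) = X := by
    intro X; simp
  rw [hnil]
  rw [pyRange_pairs_eq_zipWith
      (fun x y => findpathlistA (PySem.Dict.getD keypadA x (0, 0))
        (PySem.Dict.getD keypadA y (0, 0))) solve.toList,
    goB_eq_prodJoin]
  congr 1
  rcases hpre with hlen | hall
  · match solve.toList, hlen with
    | [], _ => rfl
    | [a], _ => rfl
  · have hmem : ∀ c ∈ solve.toList, c ∈ keyChars := by
      intro c hc
      have := List.all_eq_true.mp hall c hc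
      simpa [keyChars] using this
    apply zipWith_congr_mem
    intro x hx y hy
    rw [pos_eq x (hmem x hx), pos_eq y (hmem y (List.mem_of_mem_tail hy))]
    exact findA_eq_optionsB _ _
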